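-- pv_equiv track=rewrite | github.com/didriknielsen/survae_flows | survae/nn/layers/autoregressive/seq_reorder.py | _prep_zigzag_cs
-- ===== SOURCE A (Python) =====
-- def _prep_zigzag_cs(channels, height, width):
--
--     diagonals=[[] for i in range(height+width-1)]
--
--     for i in range(height):
--         for j in range(width):
--             sum=i+j
--             if(sum%2 ==0):
--
--                 #add at beginning
--                 diagonals[sum].insert(0,(i,j))
--             else:
--
--                 #add at end of the list
--                 diagonals[sum].append((i,j))
--
--     idx_list = []
--     # print the solution as it as
--     for d in diagonals:
--         for idx in d:
--             for c in range(channels):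
--                 idx_list.append((c,)+idx)
--
--     idx0, idx1, idx2 = zip(*idx_list)
--     return idx0, idx1, idx2
-- ===== SOURCE B (Python) =====
-- def _prep_zigzag_cs(channels, height, width):
--     idx_list = []
--     for d in range(height + width - 1):
--         lo = max(0, d - width + 1)
--         hi = min(d, height - 1)
--         rows = range(hi, lo - 1, -1) if d % 2 == 0 else range(lo, hi + 1)
--         for i in rows:
--             j = d - i
--             for c in range(channels):
--                 idx_list.append((c, i, j))
--     idx0, idx1, idx2 = zip(*idx_list)
--     return idx0, idx1, idx2
-- ===== Notes on version B (the rewrite author's own statement) =====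
-- stated objective: simpler
-- what changed: B drops A's bucket table (a list of per-diagonal lists filled by a full-grid scan with insert(0)/append) and instead walks each diagonal d once, computing its row bounds lo/hi arithmetically and emitting rows in decreasing order for even d and increasing order for odd d.
import Mathlib
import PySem

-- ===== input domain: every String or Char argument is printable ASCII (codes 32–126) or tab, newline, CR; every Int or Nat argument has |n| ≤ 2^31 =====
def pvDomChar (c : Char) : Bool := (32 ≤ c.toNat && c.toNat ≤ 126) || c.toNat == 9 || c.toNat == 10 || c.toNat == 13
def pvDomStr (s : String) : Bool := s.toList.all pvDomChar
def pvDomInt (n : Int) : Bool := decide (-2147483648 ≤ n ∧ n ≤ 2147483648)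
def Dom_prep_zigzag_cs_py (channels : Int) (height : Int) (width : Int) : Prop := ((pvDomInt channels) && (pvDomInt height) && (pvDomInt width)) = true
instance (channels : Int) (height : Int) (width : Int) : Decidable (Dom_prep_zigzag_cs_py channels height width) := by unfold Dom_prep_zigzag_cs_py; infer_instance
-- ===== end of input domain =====

-- B replaces A's per-diagonal bucket table and full-grid insert(0)/append scan with one
-- arithmetic pass per diagonal (objective: simpler).

-- zip(*idx_list) on a list of 3-tuples: the three component lists (exact for nonempty idx_list;
-- on the empty list Python raises ValueError, excluded by Pre_).
def pvZipStar3 (l : List (Int × Int × Int)) : List (List Int) :=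
  [l.map (fun t => t.1), l.map (fun t => t.2.1), l.map (fun t => t.2.2)]

-- in-place update diagonals[k] = f(diagonals[k]) for 0 ≤ k < len (the only indices A uses; exact there)
def pvModAt {α : Type} (f : α → α) : Int → List α → List α
  | _, [] => []
  | k, x :: xs => if k = 0 then f x :: xs else x :: pvModAt f (k - 1) xs

-- ===== PORT A =====
def prep_zigzag_cs_py (channels : Int) (height : Int) (width : Int) : List (List Int) :=
  let diagonals0 : List (List (Int × Int)) :=
    (PySem.List.pyRange 0 (height + width - 1) 1).map (fun _ => ([] : List (Int × Int)))
  let diagonals :=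
    (PySem.List.pyRange 0 height 1).foldl (fun diags i =>
      (PySem.List.pyRange 0 width 1).foldl (fun diags j =>
        if PySem.Int.mod (i + j) 2 = 0 then
          pvModAt (fun l => (i, j) :: l) (i + j) diags      -- diagonals[sum].insert(0, (i, j))
        else
          pvModAt (fun l => l ++ [(i, j)]) (i + j) diags    -- diagonals[sum].append((i, j))
      ) diags) diagonals0
  let idx_list :=
    diagonals.foldl (fun acc d =>
      d.foldl (fun acc idx =>
        (PySem.List.pyRange 0 channels 1).foldl (fun acc c =>
          acc ++ [(c, idx.1, idx.2)]) acc) acc) []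
  pvZipStar3 idx_list

-- ===== PORT B =====
def prep_zigzag_cs_py_alt (channels : Int) (height : Int) (width : Int) : List (List Int) :=
  let idx_list :=
    (PySem.List.pyRange 0 (height + width - 1) 1).foldl (fun acc d =>
      let lo := max 0 (d - width + 1)
      let hi := min d (height - 1)
      let rows := if PySem.Int.mod d 2 = 0 then PySem.List.pyRange hi (lo - 1) (-1)
                  else PySem.List.pyRange lo (hi + 1) 1
      rows.foldl (fun acc i =>
        (PySem.List.pyRange 0 channels 1).foldl (fun acc c =>
          acc ++ [(c, i, d - i)]) acc) acc) []
  pvZipStar3 idx_list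

-- ===== PRECONDITION & SPEC =====
-- Pre_ excludes exactly the inputs where any of channels/height/width is ≤ 0: there idx_list
-- is empty and both A and B raise ValueError at 'idx0, idx1, idx2 = zip(*idx_list)'.
def Pre_prep_zigzag_cs_py (channels : Int) (height : Int) (width : Int) : Prop :=
  1 ≤ channels ∧ 1 ≤ height ∧ 1 ≤ width
instance (channels : Int) (height : Int) (width : Int) : Decidable (Pre_prep_zigzag_cs_py channels height width) := by unfold Pre_prep_zigzag_cs_py; infer_instance

def pvWitness_prep_zigzag_cs_py : Int × Int × Int := (1, 2, 3)

def Spec_prep_zigzag_cs_py (channels : Int) (height : Int) (width : Int) (out : List (List Int)) : Prop := out = prep_zigzag_cs_py_alt channels height width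
instance (channels : Int) (height : Int) (width : Int) (out : List (List Int)) : Decidable (Spec_prep_zigzag_cs_py channels height width out) := by unfold Spec_prep_zigzag_cs_py; infer_instance

-- ===== CLAIM (what is proved, stated in full; the proofs are below) =====
def Claim_equal_prep_zigzag_cs_py : Prop := ∀ (channels : Int) (height : Int) (width : Int), Dom_prep_zigzag_cs_py channels height width → Pre_prep_zigzag_cs_py channels height width → Spec_prep_zigzag_cs_py channels height width (prep_zigzag_cs_py channels height width)

-- ===== LEMMAS AND PROOFS =====

-- A's bucket of diagonal d after processing rows 0..n-1: the valid row indices i < n in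
-- increasing order as (i, d-i) pairs, reversed when d is even
def pvDPairs (height width d n : Int) : List (Int × Int) :=
  let l := (PySem.List.pyRange (max 0 (d - width + 1)) (min (min d (height - 1)) (n - 1) + 1) 1).map
             (fun i => (i, d - i))
  if PySem.Int.mod d 2 = 0 then l.reverse else l

theorem pvModAt_map_range {α : Type} (f : α → α) (g : Nat → α) (N k : Nat) (hk : k < N) :
    pvModAt f (k : Int) ((List.range N).map g)
      = (List.range N).map (fun d => if d = k then f (g d) else g d) := by
  induction N generalizing g k with
  | zero => omega
  | succ n ih =>
    rw [List.range_succ_eq_map]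
    cases k with
    | zero =>
      simp [pvModAt, List.map_map, Function.comp_def]
    | succ k =>
      have h1 : ((k + 1 : Nat) : Int) ≠ 0 := by push_cast; omega
      have h2 : ((k + 1 : Nat) : Int) - 1 = (k : Int) := by push_cast; ring
      simp only [List.map_cons, List.map_map, Function.comp_def, pvModAt, h1, if_false, h2]
      rw [ih (fun d => g (d + 1)) k (by omega)]
      simp

theorem pvDPairs_zero (height width d : Int) :
    pvDPairs height width d 0 = [] := by
  unfold pvDPairs
  rw [PySem.List.pyRange_one_eq_nil (by omega)]
  simp

theorem pvDPairs_untouched (height width d n : Int) (h : d < n ∨ n + width - 1 < d) :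
    pvDPairs height width d (n + 1) = pvDPairs height width d n := by
  unfold pvDPairs
  rcases h with h | h
  · have e : min (min d (height - 1)) (n + 1 - 1) = min (min d (height - 1)) (n - 1) := by omega
    rw [e]
  · rw [PySem.List.pyRange_one_eq_nil (by omega), PySem.List.pyRange_one_eq_nil (by omega)]

theorem pvDPairs_touched_even (height width d n : Int) (hn : 0 ≤ n) (hnh : n ≤ height - 1)
    (hd1 : n ≤ d) (hd2 : d ≤ n + width - 1) (hpar : PySem.Int.mod d 2 = 0) :
    pvDPairs height width d (n + 1) = (n, d - n) :: pvDPairs height width d n := by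
  have hlo : max 0 (d - width + 1) ≤ n := by omega
  have e1 : min (min d (height - 1)) (n + 1 - 1) + 1 = n + 1 := by omega
  have e2 : min (min d (height - 1)) (n - 1) + 1 = n := by omega
  unfold pvDPairs
  rw [e1, e2, PySem.List.pyRange_one_succ_right hlo, if_pos hpar, if_pos hpar]
  simp

theorem pvDPairs_touched_odd (height width d n : Int) (hn : 0 ≤ n) (hnh : n ≤ height - 1)
    (hd1 : n ≤ d) (hd2 : d ≤ n + width - 1) (hpar : ¬ PySem.Int.mod d 2 = 0) :
    pvDPairs height width d (n + 1) = pvDPairs height width d n ++ [(n, d - n)] := by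
  have hlo : max 0 (d - width + 1) ≤ n := by omega
  have e1 : min (min d (height - 1)) (n + 1 - 1) + 1 = n + 1 := by omega
  have e2 : min (min d (height - 1)) (n - 1) + 1 = n := by omega
  unfold pvDPairs
  rw [e1, e2, PySem.List.pyRange_one_succ_right hlo, if_neg hpar, if_neg hpar]
  simp

-- the inner loop (over columns j) of A, started on the table for rows < n
theorem pvInnerLoop (height width n : Int) (N : Nat) (hn : 0 ≤ n) (hnh : n ≤ height - 1)
    (hN : ∀ d : Int, 0 ≤ d → d ≤ n + width - 1 → d < (N : Int)) :
    ∀ m : Nat, (m : Int) ≤ width →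
    ((List.range m).map (Nat.cast : Nat → Int)).foldl (fun diags j =>
        if PySem.Int.mod (n + j) 2 = 0 then pvModAt (fun l => (n, j) :: l) (n + j) diags
        else pvModAt (fun l => l ++ [(n, j)]) (n + j) diags)
      ((List.range N).map (fun k : Nat => pvDPairs height width (k : Int) n))
    = (List.range N).map (fun k : Nat =>
        if n ≤ (k : Int) ∧ (k : Int) < n + (m : Int) then pvDPairs height width (k : Int) (n + 1)
        else pvDPairs height width (k : Int) n) := by
  intro m
  induction m with
  | zero =>
    intro _
    simp only [List.range_zero, List.map_nil, List.foldl_nil]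
    refine List.map_congr_left ?_
    intro k _
    rw [if_neg (by push_cast; omega)]
  | succ m ih =>
    intro hm
    have hm' : (m : Int) ≤ width := by push_cast at hm ⊢; omega
    rw [List.range_succ, List.map_append, List.foldl_append, ih hm']
    simp only [List.map_cons, List.map_nil, List.foldl_cons, List.foldl_nil]
    have hs0 : (0 : Int) ≤ n + (m : Int) := by omega
    have hsN : (n + (m : Int)).toNat < N := by
      have := hN (n + (m : Int)) hs0 (by push_cast at hm; omega)
      omega
    have hcast : (((n + (m : Int)).toNat : Nat) : Int) = n + (m : Int) := Int.toNat_of_nonneg hs0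
    have hmain : ∀ (F : List (Int × Int) → List (Int × Int)),
        (F (pvDPairs height width (n + (m : Int)) n) = pvDPairs height width (n + (m : Int)) (n + 1)) →
        pvModAt F (n + (m : Int))
          ((List.range N).map (fun k : Nat =>
            if n ≤ (k : Int) ∧ (k : Int) < n + (m : Int) then pvDPairs height width (k : Int) (n + 1)
            else pvDPairs height width (k : Int) n))
        = (List.range N).map (fun k : Nat =>
            if n ≤ (k : Int) ∧ (k : Int) < n + ((m : Nat) + 1 : Nat) then pvDPairs height width (k : Int) (n + 1)
            else pvDPairs height width (k : Int) n) := by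
      intro F hF
      rw [← hcast, pvModAt_map_range F _ N _ hsN]
      refine List.map_congr_left ?_
      intro k hk
      by_cases hke : k = (n + (m : Int)).toNat
      · subst hke
        rw [if_pos rfl, if_neg (by omega), if_pos (by rw [hcast]; push_cast; omega)]
        rw [hcast, hF]
      · rw [if_neg hke]
        have hkne : (k : Int) ≠ n + (m : Int) := by omega
        by_cases h1 : n ≤ (k : Int) ∧ (k : Int) < (((n + (m : Int)).toNat : Nat) : Int)
        · rw [if_pos h1, if_pos (by rw [hcast] at h1; push_cast; omega)]
        · rw [if_neg h1, if_neg (by rw [hcast] at h1; push_cast; omega)]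
    by_cases hpar : PySem.Int.mod (n + (m : Int)) 2 = 0
    · rw [if_pos hpar]
      refine hmain _ ?_
      rw [pvDPairs_touched_even height width (n + (m : Int)) n hn hnh (by omega) (by push_cast at hm; omega) hpar]
      have e : n + (m : Int) - n = (m : Int) := by ring
      rw [e]
    · rw [if_neg hpar]
      refine hmain _ ?_
      rw [pvDPairs_touched_odd height width (n + (m : Int)) n hn hnh (by omega) (by push_cast at hm; omega) hpar]
      have e : n + (m : Int) - n = (m : Int) := by ring
      rw [e]

-- the outer loop (over rows i) of A: after n rows the table holds pvDPairs · n
theorem pvOuterLoop (height width : Int) (N : Nat) (hw : 1 ≤ width)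
    (hN : (N : Int) = height + width - 1) :
    ∀ n : Nat, (n : Int) ≤ height →
    ((List.range n).map (Nat.cast : Nat → Int)).foldl (fun diags i =>
        ((List.range width.toNat).map (Nat.cast : Nat → Int)).foldl (fun diags j =>
          if PySem.Int.mod (i + j) 2 = 0 then pvModAt (fun l => (i, j) :: l) (i + j) diags
          else pvModAt (fun l => l ++ [(i, j)]) (i + j) diags) diags)
      (((List.range N).map (Nat.cast : Nat → Int)).map (fun _ => ([] : List (Int × Int))))
    = (List.range N).map (fun k : Nat => pvDPairs height width (k : Int) n) := by
  have hwc : ((width.toNat : Nat) : Int) = width := Int.toNat_of_nonneg (by omega)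
  intro n
  induction n with
  | zero =>
    intro _
    simp only [List.range_zero, List.map_nil, List.foldl_nil, List.map_map]
    refine List.map_congr_left ?_
    intro k _
    simp only [Function.comp_apply, Nat.cast_zero]
    exact (pvDPairs_zero height width (k : Int)).symm
  | succ n ih =>
    intro hn
    have hn' : (n : Int) ≤ height := by push_cast at hn ⊢; omega
    rw [List.range_succ, List.map_append, List.foldl_append, ih hn']
    simp only [List.map_cons, List.map_nil, List.foldl_cons, List.foldl_nil]
    rw [pvInnerLoop height width (n : Int) N (by omega) (by push_cast at hn; omega)
      (by intro d h1 h2; omega) width.toNat (by omega)]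
    refine List.map_congr_left ?_
    intro k hk
    by_cases hc : (n : Int) ≤ (k : Int) ∧ (k : Int) < (n : Int) + ((width.toNat : Nat) : Int)
    · rw [if_pos hc]
      push_cast
      rfl
    · rw [if_neg hc]
      push_cast
      rw [pvDPairs_untouched height width (k : Int) (n : Int) (by rw [hwc] at hc; omega)]

-- final bucket d equals B's zig rows as pairs
theorem pvDPairs_final (height width d : Int) :
    pvDPairs height width d height
      = (if PySem.Int.mod d 2 = 0
           then PySem.List.pyRange (min d (height - 1)) (max 0 (d - width + 1) - 1) (-1)
           else PySem.List.pyRange (max 0 (d - width + 1)) (min d (height - 1) + 1) 1).map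
          (fun i => (i, d - i)) := by
  unfold pvDPairs
  have e : min (min d (height - 1)) (height - 1) = min d (height - 1) := by omega
  rw [e, PySem.List.pyRange_neg_one_eq_reverse]
  have e2 : max 0 (d - width + 1) - 1 + 1 = max 0 (d - width + 1) := by ring
  rw [e2]
  by_cases hpar : PySem.Int.mod d 2 = 0
  · rw [if_pos hpar, if_pos hpar, List.map_reverse]
  · rw [if_neg hpar, if_neg hpar]

-- flatMap respects pointwise equality on members
theorem pvFlatMap_congr {α β : Type} (l : List α) (f g : α → List β)
    (h : ∀ x ∈ l, f x = g x) : l.flatMap f = l.flatMap g := by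
  induction l with
  | nil => rfl
  | cons x xs ih =>
    simp only [List.flatMap_cons, h x (List.mem_cons_self),
      ih (fun y hy => h y (List.mem_cons_of_mem x hy))]

-- flatMap over a mapped list
theorem pvFlatMap_map {α β γ : Type} (l : List α) (f : α → β) (g : β → List γ) :
    (l.map f).flatMap g = l.flatMap (fun x => g (f x)) := by
  induction l with
  | nil => rfl
  | cons x xs ih => simp only [List.map_cons, List.flatMap_cons, ih]

-- the channel loop appends one tuple per channel
theorem pvChanFold (cs : List Int) (i j : Int) (acc : List (Int × Int × Int)) :
    cs.foldl (fun acc c => acc ++ [(c, i, j)]) acc = acc ++ cs.map (fun c => (c, i, j)) := by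
  rw [PySem.List.foldl_append_singleton_eq_map]

-- one bucket's contribution to idx_list in A
theorem pvBucketFold (cs : List Int) (d : List (Int × Int)) (acc : List (Int × Int × Int)) :
    d.foldl (fun acc idx => cs.foldl (fun acc c => acc ++ [(c, idx.1, idx.2)]) acc) acc
      = acc ++ d.flatMap (fun idx => cs.map (fun c => (c, idx.1, idx.2))) := by
  induction d generalizing acc with
  | nil => simp
  | cons p t ih =>
    simp only [List.foldl_cons, List.flatMap_cons]
    rw [pvChanFold, ih, List.append_assoc]

-- A's whole idx_list loop
theorem pvDiagFold (cs : List Int) (L : List (List (Int × Int))) (acc : List (Int × Int × Int)) :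
    L.foldl (fun acc d =>
        d.foldl (fun acc idx => cs.foldl (fun acc c => acc ++ [(c, idx.1, idx.2)]) acc) acc) acc
      = acc ++ L.flatMap (fun d => d.flatMap (fun idx => cs.map (fun c => (c, idx.1, idx.2)))) := by
  induction L generalizing acc with
  | nil => simp
  | cons dl t ih =>
    simp only [List.foldl_cons, List.flatMap_cons]
    rw [pvBucketFold, ih, List.append_assoc]

-- one diagonal's contribution to idx_list in B
theorem pvRowFoldB (cs : List Int) (d : Int) (rows : List Int) (acc : List (Int × Int × Int)) :
    rows.foldl (fun acc i => cs.foldl (fun acc c => acc ++ [(c, i, d - i)]) acc) acc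
      = acc ++ rows.flatMap (fun i => cs.map (fun c => (c, i, d - i))) := by
  induction rows generalizing acc with
  | nil => simp
  | cons r t ih =>
    simp only [List.foldl_cons, List.flatMap_cons]
    rw [pvChanFold, ih, List.append_assoc]

-- B's whole idx_list loop
theorem pvDiagFoldB (cs : List Int) (height width : Int) (L : List Int)
    (acc : List (Int × Int × Int)) :
    L.foldl (fun acc d =>
        (if PySem.Int.mod d 2 = 0
           then PySem.List.pyRange (min d (height - 1)) (max 0 (d - width + 1) - 1) (-1)
           else PySem.List.pyRange (max 0 (d - width + 1)) (min d (height - 1) + 1) 1).foldl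
          (fun acc i => cs.foldl (fun acc c => acc ++ [(c, i, d - i)]) acc) acc) acc
      = acc ++ L.flatMap (fun d =>
          (if PySem.Int.mod d 2 = 0
             then PySem.List.pyRange (min d (height - 1)) (max 0 (d - width + 1) - 1) (-1)
             else PySem.List.pyRange (max 0 (d - width + 1)) (min d (height - 1) + 1) 1).flatMap
            (fun i => cs.map (fun c => (c, i, d - i)))) := by
  induction L generalizing acc with
  | nil => simp
  | cons d t ih =>
    simp only [List.foldl_cons, List.flatMap_cons]
    rw [pvRowFoldB, ih, List.append_assoc]

-- ===== VERDICT (by name: the statement is the Claim_ definition above) =====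
theorem prep_zigzag_cs_py_spec : Claim_equal_prep_zigzag_cs_py := by
  intro channels height width _ hpre
  obtain ⟨-, hh, hw⟩ := hpre
  unfold Spec_prep_zigzag_cs_py
  simp only [prep_zigzag_cs_py, prep_zigzag_cs_py_alt]
  congr 1
  have hNc : (((height + width - 1).toNat : Nat) : Int) = height + width - 1 :=
    Int.toNat_of_nonneg (by omega)
  have hhc : ((height.toNat : Nat) : Int) = height := Int.toNat_of_nonneg (by omega)
  have hR : ∀ b : Int, PySem.List.pyRange 0 b 1 = (List.range b.toNat).map (Nat.cast : Nat → Int) := by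
    intro b
    rw [PySem.List.pyRange_one]
    simp
  simp only [hR]
  rw [pvOuterLoop height width (height + width - 1).toNat hw hNc height.toNat (by omega)]
  rw [pvDiagFold, pvDiagFoldB]
  simp only [List.nil_append]
  rw [pvFlatMap_map, pvFlatMap_map]
  refine pvFlatMap_congr _ _ _ ?_
  intro k hk
  rw [hhc, pvDPairs_final height width (k : Int)]
  rw [pvFlatMap_map]
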